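-- pv_equiv track=rewrite | github.com/brunovskyoliver/projekt_analyza | final_version.py | komprimuj
-- ===== SOURCE A (Python) =====
-- cIntrepZnamienka = ".?!"
--
-- cPrveMalePismeno = 97 # hodnota malého a v ASCII kóde
--
-- cRozdielHodnotPismen = 32 # rozdiel medzi hodnotou veľkého a malého pismena
--
-- def komprimuj(iVeta):
--     lVelke = True
--     lSifra = ""
--     for pismeno in iVeta:
--         if pismeno == " ":
--             lVelke = True if not lVelke else False
--         else:
--             if pismeno in cIntrepZnamienka:
--                 lSifra += pismeno
--             elif ord(pismeno) >= cPrveMalePismeno and lVelke: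
--                 lSifra += chr(ord(pismeno) - cRozdielHodnotPismen)
--             elif ord(pismeno) < cPrveMalePismeno and not lVelke:
--                 lSifra += chr(ord(pismeno) + cRozdielHodnotPismen)
--             else:
--                 lSifra += pismeno
--     return lSifra
-- ===== SOURCE B (Python) =====
-- cIntrepZnamienka = ".?!"
-- cPrveMalePismeno = 97
-- cRozdielHodnotPismen = 32
--
-- def komprimuj(iVeta):
--     out = []
--     lVelke = True
--     for seg in iVeta.split(" "):
--         for pismeno in seg:
--             if pismeno in cIntrepZnamienka:
--                 out.append(pismeno)
--             elif ord(pismeno) >= cPrveMalePismeno and lVelke: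
--                 out.append(chr(ord(pismeno) - cRozdielHodnotPismen))
--             elif ord(pismeno) < cPrveMalePismeno and not lVelke:
--                 out.append(chr(ord(pismeno) + cRozdielHodnotPismen))
--             else:
--                 out.append(pismeno)
--         lVelke = not lVelke
--     return "".join(out)
-- ===== Notes on version B (the rewrite author's own statement) =====
-- stated objective: alternative
-- what changed: B splits the sentence on single spaces and transforms whole segments with a case-mode that alternates per segment, instead of A's single character loop toggling a flag on each space.
import Mathlib
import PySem

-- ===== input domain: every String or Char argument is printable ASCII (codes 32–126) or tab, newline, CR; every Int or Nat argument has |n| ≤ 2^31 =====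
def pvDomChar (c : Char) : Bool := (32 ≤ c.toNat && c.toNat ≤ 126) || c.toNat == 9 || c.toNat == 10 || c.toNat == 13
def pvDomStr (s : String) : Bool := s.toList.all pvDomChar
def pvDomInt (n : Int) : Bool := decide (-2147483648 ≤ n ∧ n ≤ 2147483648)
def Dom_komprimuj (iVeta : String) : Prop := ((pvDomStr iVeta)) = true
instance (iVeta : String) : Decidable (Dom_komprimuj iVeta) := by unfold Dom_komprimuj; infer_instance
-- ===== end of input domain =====

-- B splits on single spaces and maps each segment under an alternating case-mode instead of
-- A's per-character loop that toggles a flag on space; same return value (alternative decomposition).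

-- ===== PORT A =====
-- A's loop: state (lVelke, lSifra), one step per character, branches in A's order.
def komprimujStep (st : Bool × List Char) (pismeno : Char) : Bool × List Char :=
  if pismeno = ' ' then (!st.1, st.2)
  else if pismeno = '.' ∨ pismeno = '?' ∨ pismeno = '!' then (st.1, st.2 ++ [pismeno])
  else if 97 ≤ pismeno.toNat ∧ st.1 = true then (st.1, st.2 ++ [Char.ofNat (pismeno.toNat - 32)])
  else if pismeno.toNat < 97 ∧ st.1 = false then (st.1, st.2 ++ [Char.ofNat (pismeno.toNat + 32)])
  else (st.1, st.2 ++ [pismeno])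

def komprimuj (iVeta : String) : String :=
  String.mk (iVeta.toList.foldl komprimujStep (true, [])).2

-- ===== PORT B =====
-- split on a single space character (Python str.split(" "): keeps empty segments)
def splitSp : List Char → List (List Char)
  | [] => [[]]
  | c :: cs =>
    if c = ' ' then [] :: splitSp cs
    else
      match splitSp cs with
      | s :: ss => (c :: s) :: ss
      | [] => [[c]]

-- per-character transform under a fixed case-mode (A's branch logic, space never occurs)
def trB (lVelke : Bool) (pismeno : Char) : Char :=
  if pismeno = '.' ∨ pismeno = '?' ∨ pismeno = '!' then pismeno
  else if 97 ≤ pismeno.toNat ∧ lVelke = true then Char.ofNat (pismeno.toNat - 32)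
  else if pismeno.toNat < 97 ∧ lVelke = false then Char.ofNat (pismeno.toNat + 32)
  else pismeno

-- outer loop over segments, mode alternates after each segment
def goB : Bool → List (List Char) → List Char
  | _, [] => []
  | lVelke, s :: ss => s.map (trB lVelke) ++ goB (!lVelke) ss

def komprimuj_alt (iVeta : String) : String :=
  String.mk (goB true (splitSp iVeta.toList))

-- ===== PRECONDITION & SPEC =====
def Spec_komprimuj (iVeta : String) (out : String) : Prop := out = komprimuj_alt iVeta
instance (iVeta : String) (out : String) : Decidable (Spec_komprimuj iVeta out) := by unfold Spec_komprimuj; infer_instance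

-- ===== CLAIM (what is proved, stated in full; the proofs are below) =====
def Claim_equal_komprimuj : Prop := ∀ (iVeta : String), Dom_komprimuj iVeta → Spec_komprimuj iVeta (komprimuj iVeta)

-- ===== LEMMAS AND PROOFS =====
theorem splitSp_ne_nil (cs : List Char) : splitSp cs ≠ [] := by
  cases cs with
  | nil => simp [splitSp]
  | cons c cs =>
    simp only [splitSp]
    split
    · simp
    · cases h : splitSp cs <;> simp

theorem goB_cons_head (lVelke : Bool) (c : Char) (s : List Char) (ss : List (List Char)) :
    goB lVelke ((c :: s) :: ss) = trB lVelke c :: goB lVelke (s :: ss) := by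
  simp [goB]

theorem foldl_eq_goB (cs : List Char) (lVelke : Bool) (acc : List Char) :
    (cs.foldl komprimujStep (lVelke, acc)).2 = acc ++ goB lVelke (splitSp cs) := by
  induction cs generalizing lVelke acc with
  | nil => simp [goB, splitSp]
  | cons c cs ih =>
    by_cases hsp : c = ' '
    · subst hsp
      simp only [List.foldl, komprimujStep, if_pos rfl, splitSp, if_pos rfl, goB]
      simpa [goB] using ih (!lVelke) acc
    · have hsplit : splitSp (c :: cs) =
          (match splitSp cs with
           | s :: ss => (c :: s) :: ss
           | [] => [[c]]) := by simp [splitSp, hsp]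
      obtain ⟨s, ss, hss⟩ : ∃ s ss, splitSp cs = s :: ss := by
        cases h : splitSp cs with
        | nil => exact absurd h (splitSp_ne_nil cs)
        | cons a b => exact ⟨a, b, rfl⟩
      rw [hsplit, hss, goB_cons_head, ← hss]
      have hstep : komprimujStep (lVelke, acc) c = (lVelke, acc ++ [trB lVelke c]) := by
        simp only [komprimujStep, trB, if_neg hsp]
        split
        · rfl
        · split
          · rfl
          · split <;> rfl
      simp only [List.foldl, hstep]
      rw [ih lVelke (acc ++ [trB lVelke c])]
      simp

-- ===== VERDICT (by name: the statement is the Claim_ definition above) =====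
theorem komprimuj_spec : Claim_equal_komprimuj := by
  intro iVeta _
  unfold Spec_komprimuj komprimuj komprimuj_alt
  rw [foldl_eq_goB]
  simp
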